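-- pv_equiv track=rewrite | github.com/JRRLino/Appointment-Book | agenda_win.py | auxiliarLeituraPrioridades
-- ===== SOURCE A (Python) =====
-- def prioridadeLetraValida(char):
--     if(len(char) == 1):
--         if (ord(char) >= ord('A') and ord(char) <= ord('Z')) or (ord(char) >= ord('a') and ord(char) <= ord('z')):
--             return True;
--
--     return False;
--
-- def auxiliarLeituraPrioridades(tokens,i):
--
--     if i == len(tokens):
--         return tokens;
--
--     if(len(tokens[i]) == 3):
--         if(tokens[i][0] == '[' and prioridadeLetraValida(tokens[i][1]) and tokens[i][2] == ']'):
--             s = '('+tokens[i][1]+')'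
--             tokens[i] = s;
--
--     return auxiliarLeituraPrioridades(tokens,i+1);
-- ===== SOURCE B (Python) =====
-- def auxiliarLeituraPrioridades(tokens, i):
--     # One flat loop instead of tail recursion; mutates tokens in place like A and returns it.
--     for j in range(i, len(tokens)):
--         t = tokens[j]
--         if len(t) == 3 and t[0] == '[' and t[2] == ']' and ('A' <= t[1] <= 'Z' or 'a' <= t[1] <= 'z'):
--             tokens[j] = '(' + t[1] + ')'
--     return tokens
-- ===== Notes on version B (the rewrite author's own statement) =====
-- stated objective: simpler
-- what changed: Replaces A's tail recursion (with its index/equality guard and helper predicate) by a single flat for-loop over range(i, len(tokens)) with the guard inlined.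
import Mathlib
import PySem

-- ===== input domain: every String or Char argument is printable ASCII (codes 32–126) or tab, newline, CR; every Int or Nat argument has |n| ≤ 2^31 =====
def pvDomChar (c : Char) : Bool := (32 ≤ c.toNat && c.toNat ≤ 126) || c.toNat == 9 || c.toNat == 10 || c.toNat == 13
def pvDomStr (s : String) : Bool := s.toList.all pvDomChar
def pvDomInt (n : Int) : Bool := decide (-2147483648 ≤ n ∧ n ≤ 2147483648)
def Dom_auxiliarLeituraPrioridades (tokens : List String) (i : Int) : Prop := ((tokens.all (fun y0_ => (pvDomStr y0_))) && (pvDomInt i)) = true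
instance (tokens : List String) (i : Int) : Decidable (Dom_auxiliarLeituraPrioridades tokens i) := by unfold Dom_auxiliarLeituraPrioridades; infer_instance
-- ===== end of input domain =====

-- B replaces A's tail recursion by one flat loop over range(i, len(tokens)) with the guard
-- inlined (objective: simpler). Both A and B mutate `tokens` in place identically; the
-- theorems below are about the returned value.


-- ===== PORT A =====
-- prioridadeLetraValida: A always calls it on tokens[i][1], a 1-character string, so the
-- len(char) == 1 check is always true and the argument is ported as a Char; the ord
-- comparisons are ported exactly as Char.toNat comparisons.
def prioridadeLetraValida (char : Char) : Bool :=
  (('A'.toNat ≤ char.toNat && char.toNat ≤ 'Z'.toNat) ||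
   ('a'.toNat ≤ char.toNat && char.toNat ≤ 'z'.toNat))

-- The body of A's 'if len(tokens[i]) == 3: if tokens[i][0] == "[" and … : tokens[i] = s' block,
-- given t = tokens[i]: the length-3 test plus the accesses t[0]/t[1]/t[2] are the match on the
-- 3-character list of t; '(' + t[1] + ')' is String.ofList ['(', b, ')'].
def pvStepA (tokens : List String) (i : Int) (t : String) : List String :=
  match t.toList with
  | [a, b, c] =>
    if a == '[' && prioridadeLetraValida b && c == ']' then
      PySem.List.pySetD tokens i (String.ofList ['(', b, ')'])
    else tokens
  | _ => tokens

-- needed by the port's termination proof (pySetD preserves the length)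
theorem pvStepA_length (tokens : List String) (i : Int) (t : String) :
    (pvStepA tokens i t).length = tokens.length := by
  unfold pvStepA
  split
  · split
    · simp [PySem.List.length_pySetD]
    · rfl
  · rfl

def auxiliarLeituraPrioridades (tokens : List String) (i : Int) : List String :=
  if i = (tokens.length : Int) then tokens
  else
    match _h : PySem.List.pyGet? tokens i with
    | none => tokens  -- Python raises IndexError here; excluded by Pre_
    | some t => auxiliarLeituraPrioridades (pvStepA tokens i t) (i + 1)
termination_by ((tokens.length : Int) - i).toNat
decreasing_by
  have hin : ¬ (PySem.List.pyGet? tokens i = none) := by simp [_h]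
  rw [PySem.List.pyGet?_eq_none_iff] at hin
  have hlt : i < (tokens.length : Int) := (not_not.mp hin).2
  simp only [pvStepA_length]
  omega

-- ===== PORT B =====
-- Source B's loop body for index j, given t = tokens[j]: the guard
-- len(t) == 3 and t[0] == '[' and t[2] == ']' and ('A' <= t[1] <= 'Z' or 'a' <= t[1] <= 'z');
-- the string comparisons on the 1-character string t[1] are code-point comparisons, ported via toNat.
def pvStepB (tokens : List String) (j : Int) (t : String) : List String :=
  match t.toList with
  | [a, b, c] =>
    if a == '[' && c == ']' &&
       (('A'.toNat ≤ b.toNat && b.toNat ≤ 'Z'.toNat) ||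
        ('a'.toNat ≤ b.toNat && b.toNat ≤ 'z'.toNat)) then
      PySem.List.pySetD tokens j (String.ofList ['(', b, ')'])
    else tokens
  | _ => tokens

-- Source B: for j in range(i, len(tokens)): …; return tokens
def auxiliarLeituraPrioridades_alt (tokens : List String) (i : Int) : List String :=
  (PySem.List.pyRange i (tokens.length : Int) 1).foldl
    (fun acc j =>
      match PySem.List.pyGet? acc j with
      | none => acc  -- Python raises IndexError here; excluded by Pre_
      | some t => pvStepB acc j t)
    tokens

-- ===== PRECONDITION & SPEC =====
-- Pre_: exactly the inputs on which Python A returns (for i > len(tokens) it raises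
-- IndexError at tokens[i]; for i < -len(tokens) the wrapped access tokens[i] raises too).
def Pre_auxiliarLeituraPrioridades (tokens : List String) (i : Int) : Prop :=
  -(tokens.length : Int) ≤ i ∧ i ≤ (tokens.length : Int)
instance (tokens : List String) (i : Int) : Decidable (Pre_auxiliarLeituraPrioridades tokens i) := by
  unfold Pre_auxiliarLeituraPrioridades; infer_instance

def pvWitness_auxiliarLeituraPrioridades : List String × Int := (["[a]", "x", "[AB]"], 0)

def Spec_auxiliarLeituraPrioridades (tokens : List String) (i : Int) (out : List String) : Prop := out = auxiliarLeituraPrioridades_alt tokens i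
instance (tokens : List String) (i : Int) (out : List String) : Decidable (Spec_auxiliarLeituraPrioridades tokens i out) := by unfold Spec_auxiliarLeituraPrioridades; infer_instance

-- ===== CLAIM (what is proved, stated in full; the proofs are below) =====
def Claim_equal_auxiliarLeituraPrioridades : Prop := ∀ (tokens : List String) (i : Int), Dom_auxiliarLeituraPrioridades tokens i → Pre_auxiliarLeituraPrioridades tokens i → Spec_auxiliarLeituraPrioridades tokens i (auxiliarLeituraPrioridades tokens i)

-- ===== LEMMAS AND PROOFS =====

-- A's guard is B's guard with the conjuncts reordered, so the two step functions agree.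
theorem pvStep_eq (tokens : List String) (i : Int) (t : String) :
    pvStepA tokens i t = pvStepB tokens i t := by
  unfold pvStepA pvStepB
  split
  · rename_i a b c _
    simp only [prioridadeLetraValida]
    cases hp : (a == '[') <;> cases hq : (c == ']') <;> simp_all
  · rfl

theorem pvStepB_length (tokens : List String) (j : Int) (t : String) :
    (pvStepB tokens j t).length = tokens.length := by
  rw [← pvStep_eq]; exact pvStepA_length tokens j t

-- Within Pre_, A's recursion and B's fold perform the identical sequence of index steps
-- i, i+1, …, len-1; induction on the number of remaining steps.
theorem pv_main (n : Nat) : ∀ (tokens : List String) (i : Int),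
    ((tokens.length : Int) - i).toNat = n →
    -(tokens.length : Int) ≤ i → i ≤ (tokens.length : Int) →
    auxiliarLeituraPrioridades tokens i = auxiliarLeituraPrioridades_alt tokens i := by
  induction n with
  | zero =>
    intro tokens i hn hlo hhi
    have hi : i = (tokens.length : Int) := by omega
    rw [auxiliarLeituraPrioridades, auxiliarLeituraPrioridades_alt, if_pos hi, hi,
      PySem.List.pyRange_one_eq_nil le_rfl]
    rfl
  | succ n ih =>
    intro tokens i hn hlo hhi
    have hi : i < (tokens.length : Int) := by omega
    have hget : ¬ (PySem.List.pyGet? tokens i = none) := by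
      rw [PySem.List.pyGet?_eq_none_iff, PySem.Raise.InRange]
      exact not_not_intro ⟨hlo, hi⟩
    obtain ⟨t, ht⟩ := Option.ne_none_iff_exists'.mp hget
    have key : auxiliarLeituraPrioridades_alt tokens i
        = auxiliarLeituraPrioridades_alt (pvStepB tokens i t) (i + 1) := by
      rw [auxiliarLeituraPrioridades_alt, auxiliarLeituraPrioridades_alt,
        PySem.List.pyRange_one_cons hi, List.foldl_cons, pvStepB_length]
      simp only [ht]
    rw [auxiliarLeituraPrioridades, if_neg (by omega)]
    split
    · rename_i heq
      rw [ht] at heq; cases heq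
    · rename_i t' heq
      rw [ht] at heq
      cases heq
      rw [pvStep_eq, key]
      exact ih (pvStepB tokens i t) (i + 1) (by rw [pvStepB_length]; omega)
        (by rw [pvStepB_length]; omega) (by rw [pvStepB_length]; omega)

-- ===== VERDICT (by name: the statement is the Claim_ definition above) =====
theorem auxiliarLeituraPrioridades_spec : Claim_equal_auxiliarLeituraPrioridades := by
  intro tokens i _ hpre
  exact pv_main ((tokens.length : Int) - i).toNat tokens i rfl hpre.1 hpre.2
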